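-- pv_equiv track=rewrite | github.com/neeld3/PyGuide | pyguide_backend.py | compute_badges
-- ===== SOURCE A (Python) =====
-- BADGES = [
--     {
--         "id": "first_lesson",
--         "name": "Starter Coder",
--         "icon": "🌱",
--         "desc": "Completed your first lesson."
--     },
--     {
--         "id": "level1_master",
--         "name": "Level 1 Master",
--         "icon": "🏆",
--         "desc": "Completed all Level 1 lessons."
--     },
--     {
--         "id": "score_50",
--         "name": "On Fire",
--         "icon": "🔥",
--         "desc": "Reached 50 points."
--     },
--     {
--         "id": "score_100",
--         "name": "Python Pro",
--         "icon": "🐍",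
--         "desc": "Reached 100 points."
--     },
--     {
--         "id": "score_250",
--         "name": "Code Warrior",
--         "icon": "⚔️",
--         "desc": "Reached 250 points."
--     },
--     {
--         "id": "score_500",
--         "name": "Algorithm Adept",
--         "icon": "🧠",
--         "desc": "Reached 500 points."
--     },
--     {
--         "id": "score_1000",
--         "name": "Code Champion",
--         "icon": "🥇",
--         "desc": "Reached 1,000 points."
--     },
--     {
--         "id": "score_2000",
--         "name": "Legendary Engineer",
--         "icon": "🏅",
--         "desc": "Reached 2,000 points."
--     },
--     {
--         "id": "score_4000",
--         "name": "Grandmaster Coder",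
--         "icon": "👑",
--         "desc": "Reached 4,000 points."
--     },
-- ]
--
-- def compute_badges(score: int, completed_lessons: list, level1_total: int) -> list:
--     earned = []
--
--     if len(completed_lessons) >= 1:
--         earned.append(BADGES[0])
--
--     if level1_total > 0 and len([l for l in completed_lessons if l <= level1_total]) >= level1_total:
--         earned.append(BADGES[1])
--
--     if score >= 50:
--         earned.append(BADGES[2])
--     if score >= 100:
--         earned.append(BADGES[3])
--     if score >= 250:
--         earned.append(BADGES[4])
--     if score >= 500:
--         earned.append(BADGES[5])
--     if score >= 1000:
--         earned.append(BADGES[6])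
--     if score >= 2000:
--         earned.append(BADGES[7])
--     if score >= 4000:
--         earned.append(BADGES[8])
--
--     return earned
-- ===== SOURCE B (Python) =====
-- BADGES = [
--     {"id": "first_lesson", "name": "Starter Coder", "icon": "🌱",
--      "desc": "Completed your first lesson."},
--     {"id": "level1_master", "name": "Level 1 Master", "icon": "🏆",
--      "desc": "Completed all Level 1 lessons."},
--     {"id": "score_50", "name": "On Fire", "icon": "🔥",
--      "desc": "Reached 50 points."},
--     {"id": "score_100", "name": "Python Pro", "icon": "🐍",
--      "desc": "Reached 100 points."},
--     {"id": "score_250", "name": "Code Warrior", "icon": "⚔️",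
--      "desc": "Reached 250 points."},
--     {"id": "score_500", "name": "Algorithm Adept", "icon": "🧠",
--      "desc": "Reached 500 points."},
--     {"id": "score_1000", "name": "Code Champion", "icon": "🥇",
--      "desc": "Reached 1,000 points."},
--     {"id": "score_2000", "name": "Legendary Engineer", "icon": "🏅",
--      "desc": "Reached 2,000 points."},
--     {"id": "score_4000", "name": "Grandmaster Coder", "icon": "👑",
--      "desc": "Reached 4,000 points."},
-- ]
--
-- SCORE_THRESHOLDS = [50, 100, 250, 500, 1000, 2000, 4000]
--
--
-- def _bisect_right(ts, x):
--     """Index of the first threshold strictly greater than x (binary search)."""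
--     lo, hi = 0, len(ts)
--     while lo < hi:
--         mid = (lo + hi) // 2
--         if x >= ts[mid]:
--             lo = mid + 1
--         else:
--             hi = mid
--     return lo
--
--
-- def compute_badges(score: int, completed_lessons: list, level1_total: int) -> list:
--     earned = []
--     if completed_lessons:
--         earned.append(BADGES[0])
--     if level1_total > 0 and sum(1 for l in completed_lessons if l <= level1_total) >= level1_total:
--         earned.append(BADGES[1])
--     tiers = _bisect_right(SCORE_THRESHOLDS, score)
--     earned.extend(BADGES[2:2 + tiers])
--     return earned
-- ===== Notes on version B (the rewrite author's own statement) =====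
-- stated objective: idiomatic
-- what changed: The seven sequential score comparisons are replaced by a binary search (bisect_right) over a sorted threshold table followed by extending with the contiguous slice BADGES[2:2+count].
import Mathlib
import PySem

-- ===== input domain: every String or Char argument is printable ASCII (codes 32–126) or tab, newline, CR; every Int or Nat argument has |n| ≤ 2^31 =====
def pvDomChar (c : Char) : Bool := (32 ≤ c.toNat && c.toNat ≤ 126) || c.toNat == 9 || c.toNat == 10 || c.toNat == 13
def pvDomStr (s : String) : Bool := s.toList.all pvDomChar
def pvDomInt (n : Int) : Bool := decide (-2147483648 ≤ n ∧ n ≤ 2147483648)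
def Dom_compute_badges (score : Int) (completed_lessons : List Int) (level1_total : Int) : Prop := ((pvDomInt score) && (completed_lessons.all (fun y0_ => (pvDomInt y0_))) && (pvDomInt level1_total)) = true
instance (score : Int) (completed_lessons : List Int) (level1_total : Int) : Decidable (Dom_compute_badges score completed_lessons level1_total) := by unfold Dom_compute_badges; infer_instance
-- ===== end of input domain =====

-- B replaces the seven sequential score comparisons by a binary search over the sorted
-- threshold table and one contiguous slice of BADGES (objective: idiomatic; not faster).

-- the module-level BADGES table (each dict -> association list in insertion order)
def pvBADGES : List (List (String × String)) :=
  [ [("id", "first_lesson"), ("name", "Starter Coder"), ("icon", "🌱"), ("desc", "Completed your first lesson.")]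
  , [("id", "level1_master"), ("name", "Level 1 Master"), ("icon", "🏆"), ("desc", "Completed all Level 1 lessons.")]
  , [("id", "score_50"), ("name", "On Fire"), ("icon", "🔥"), ("desc", "Reached 50 points.")]
  , [("id", "score_100"), ("name", "Python Pro"), ("icon", "🐍"), ("desc", "Reached 100 points.")]
  , [("id", "score_250"), ("name", "Code Warrior"), ("icon", "⚔️"), ("desc", "Reached 250 points.")]
  , [("id", "score_500"), ("name", "Algorithm Adept"), ("icon", "🧠"), ("desc", "Reached 500 points.")]
  , [("id", "score_1000"), ("name", "Code Champion"), ("icon", "🥇"), ("desc", "Reached 1,000 points.")]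
  , [("id", "score_2000"), ("name", "Legendary Engineer"), ("icon", "🏅"), ("desc", "Reached 2,000 points.")]
  , [("id", "score_4000"), ("name", "Grandmaster Coder"), ("icon", "👑"), ("desc", "Reached 4,000 points.")]
  ]

-- ===== PORT A =====
def compute_badges (score : Int) (completed_lessons : List Int) (level1_total : Int) : List (List (String × String)) :=
  let earned : List (List (String × String)) := []
  let earned := if completed_lessons.length ≥ 1 then earned ++ [pvBADGES.getD 0 []] else earned
  let earned := if level1_total > 0 ∧ (((completed_lessons.filter (fun l => l ≤ level1_total)).length : Int) ≥ level1_total) then earned ++ [pvBADGES.getD 1 []] else earned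
  let earned := if score ≥ 50 then earned ++ [pvBADGES.getD 2 []] else earned
  let earned := if score ≥ 100 then earned ++ [pvBADGES.getD 3 []] else earned
  let earned := if score ≥ 250 then earned ++ [pvBADGES.getD 4 []] else earned
  let earned := if score ≥ 500 then earned ++ [pvBADGES.getD 5 []] else earned
  let earned := if score ≥ 1000 then earned ++ [pvBADGES.getD 6 []] else earned
  let earned := if score ≥ 2000 then earned ++ [pvBADGES.getD 7 []] else earned
  let earned := if score ≥ 4000 then earned ++ [pvBADGES.getD 8 []] else earned
  earned

-- ===== PORT B =====
def pvTHRESH : List Int := [50, 100, 250, 500, 1000, 2000, 4000]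

-- _bisect_right's while-loop; fuel = hi - lo bounds the iteration count (structural recursion)
def pvBisectLoop (ts : List Int) (x : Int) : Nat → Nat → Nat → Nat
  | 0, lo, _ => lo
  | fuel + 1, lo, hi =>
    if lo < hi then
      let mid := (lo + hi) / 2
      if x ≥ ts.getD mid 0 then pvBisectLoop ts x fuel (mid + 1) hi
      else pvBisectLoop ts x fuel lo mid
    else lo

def compute_badges_alt (score : Int) (completed_lessons : List Int) (level1_total : Int) : List (List (String × String)) :=
  let earned : List (List (String × String)) := []
  let earned := if completed_lessons ≠ [] then earned ++ [pvBADGES.getD 0 []] else earned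
  let earned := if level1_total > 0 ∧ (completed_lessons.foldl (fun acc l => if l ≤ level1_total then acc + 1 else acc) (0 : Int)) ≥ level1_total then earned ++ [pvBADGES.getD 1 []] else earned
  let tiers := pvBisectLoop pvTHRESH score pvTHRESH.length 0 pvTHRESH.length
  earned ++ PySem.List.slice pvBADGES (some 2) (some (2 + (tiers : Int)))

-- ===== PRECONDITION & SPEC =====
def Spec_compute_badges (score : Int) (completed_lessons : List Int) (level1_total : Int) (out : List (List (String × String))) : Prop := out = compute_badges_alt score completed_lessons level1_total
instance (score : Int) (completed_lessons : List Int) (level1_total : Int) (out : List (List (String × String))) : Decidable (Spec_compute_badges score completed_lessons level1_total out) := by unfold Spec_compute_badges; infer_instance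

-- ===== CLAIM (what is proved, stated in full; the proofs are below) =====
def Claim_equal_compute_badges : Prop := ∀ (score : Int) (completed_lessons : List Int) (level1_total : Int), Dom_compute_badges score completed_lessons level1_total → Spec_compute_badges score completed_lessons level1_total (compute_badges score completed_lessons level1_total)

-- ===== LEMMAS AND PROOFS =====

-- the generator-sum counts exactly the filtered length
theorem pvCount_eq (t : Int) (cl : List Int) (acc : Int) :
    cl.foldl (fun acc l => if l ≤ t then acc + 1 else acc) acc
      = acc + ((cl.filter (fun l => l ≤ t)).length : Int) := by
  induction cl generalizing acc with
  | nil => simp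
  | cons x xs ih =>
    simp only [List.foldl_cons, List.filter_cons]
    by_cases h : x ≤ t
    · simp [h, ih]; ring
    · simp [h, ih]

-- the binary search over the 7 thresholds, in closed form
theorem pvBisect_eq (x : Int) :
    pvBisectLoop pvTHRESH x pvTHRESH.length 0 pvTHRESH.length
      = if x ≥ 4000 then 7 else if x ≥ 2000 then 6 else if x ≥ 1000 then 5
        else if x ≥ 500 then 4 else if x ≥ 250 then 3 else if x ≥ 100 then 2
        else if x ≥ 50 then 1 else 0 := by
  by_cases h4000 : (4000:Int) ≤ x
  · simp [pvBisectLoop, pvTHRESH, show (50:Int) ≤ x by omega, show (100:Int) ≤ x by omega, show (250:Int) ≤ x by omega, show (500:Int) ≤ x by omega, show (1000:Int) ≤ x by omega, show (2000:Int) ≤ x by omega, show (4000:Int) ≤ x by omega]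
  · by_cases h2000 : (2000:Int) ≤ x
    · simp [pvBisectLoop, pvTHRESH, show (50:Int) ≤ x by omega, show (100:Int) ≤ x by omega, show (250:Int) ≤ x by omega, show (500:Int) ≤ x by omega, show (1000:Int) ≤ x by omega, show (2000:Int) ≤ x by omega, show ¬ (4000:Int) ≤ x by omega]
    · by_cases h1000 : (1000:Int) ≤ x
      · simp [pvBisectLoop, pvTHRESH, show (50:Int) ≤ x by omega, show (100:Int) ≤ x by omega, show (250:Int) ≤ x by omega, show (500:Int) ≤ x by omega, show (1000:Int) ≤ x by omega, show ¬ (2000:Int) ≤ x by omega, show ¬ (4000:Int) ≤ x by omega]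
      · by_cases h500 : (500:Int) ≤ x
        · simp [pvBisectLoop, pvTHRESH, show (50:Int) ≤ x by omega, show (100:Int) ≤ x by omega, show (250:Int) ≤ x by omega, show (500:Int) ≤ x by omega, show ¬ (1000:Int) ≤ x by omega, show ¬ (2000:Int) ≤ x by omega, show ¬ (4000:Int) ≤ x by omega]
        · by_cases h250 : (250:Int) ≤ x
          · simp [pvBisectLoop, pvTHRESH, show (50:Int) ≤ x by omega, show (100:Int) ≤ x by omega, show (250:Int) ≤ x by omega, show ¬ (500:Int) ≤ x by omega, show ¬ (1000:Int) ≤ x by omega, show ¬ (2000:Int) ≤ x by omega, show ¬ (4000:Int) ≤ x by omega]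
          · by_cases h100 : (100:Int) ≤ x
            · simp [pvBisectLoop, pvTHRESH, show (50:Int) ≤ x by omega, show (100:Int) ≤ x by omega, show ¬ (250:Int) ≤ x by omega, show ¬ (500:Int) ≤ x by omega, show ¬ (1000:Int) ≤ x by omega, show ¬ (2000:Int) ≤ x by omega, show ¬ (4000:Int) ≤ x by omega]
            · by_cases h50 : (50:Int) ≤ x
              · simp [pvBisectLoop, pvTHRESH, show (50:Int) ≤ x by omega, show ¬ (100:Int) ≤ x by omega, show ¬ (250:Int) ≤ x by omega, show ¬ (500:Int) ≤ x by omega, show ¬ (1000:Int) ≤ x by omega, show ¬ (2000:Int) ≤ x by omega, show ¬ (4000:Int) ≤ x by omega]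
              · simp [pvBisectLoop, pvTHRESH, show ¬ (50:Int) ≤ x by omega, show ¬ (100:Int) ≤ x by omega, show ¬ (250:Int) ≤ x by omega, show ¬ (500:Int) ≤ x by omega, show ¬ (1000:Int) ≤ x by omega, show ¬ (2000:Int) ≤ x by omega, show ¬ (4000:Int) ≤ x by omega]

-- the seven-if chain equals one contiguous slice driven by the binary-search count
theorem pvChain (s : Int) (E : List (List (String × String))) :
    (let e := if s ≥ 50 then E ++ [pvBADGES.getD 2 []] else E
     let e := if s ≥ 100 then e ++ [pvBADGES.getD 3 []] else e
     let e := if s ≥ 250 then e ++ [pvBADGES.getD 4 []] else e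
     let e := if s ≥ 500 then e ++ [pvBADGES.getD 5 []] else e
     let e := if s ≥ 1000 then e ++ [pvBADGES.getD 6 []] else e
     let e := if s ≥ 2000 then e ++ [pvBADGES.getD 7 []] else e
     if s ≥ 4000 then e ++ [pvBADGES.getD 8 []] else e)
      = E ++ PySem.List.slice pvBADGES (some 2)
          (some (2 + ((pvBisectLoop pvTHRESH s pvTHRESH.length 0 pvTHRESH.length : Nat) : Int))) := by
  rw [pvBisect_eq]
  by_cases h4000 : s ≥ 4000
  · simp [h4000, show s ≥ 2000 by omega, show s ≥ 1000 by omega, show s ≥ 500 by omega,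
      show s ≥ 250 by omega, show s ≥ 100 by omega, show s ≥ 50 by omega,
      PySem.List.slice, pvBADGES, List.append_assoc]
  · by_cases h2000 : s ≥ 2000
    · simp [h4000, h2000, show s ≥ 1000 by omega, show s ≥ 500 by omega,
        show s ≥ 250 by omega, show s ≥ 100 by omega, show s ≥ 50 by omega,
        PySem.List.slice, pvBADGES, List.append_assoc]
    · by_cases h1000 : s ≥ 1000
      · simp [h4000, h2000, h1000, show s ≥ 500 by omega, show s ≥ 250 by omega,
          show s ≥ 100 by omega, show s ≥ 50 by omega,
          PySem.List.slice, pvBADGES, List.append_assoc]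
      · by_cases h500 : s ≥ 500
        · simp [h4000, h2000, h1000, h500, show s ≥ 250 by omega, show s ≥ 100 by omega,
            show s ≥ 50 by omega, PySem.List.slice, pvBADGES, List.append_assoc]
        · by_cases h250 : s ≥ 250
          · simp [h4000, h2000, h1000, h500, h250, show s ≥ 100 by omega,
              show s ≥ 50 by omega, PySem.List.slice, pvBADGES, List.append_assoc]
          · by_cases h100 : s ≥ 100
            · simp [h4000, h2000, h1000, h500, h250, h100, show s ≥ 50 by omega,
                PySem.List.slice, pvBADGES, List.append_assoc]
            · by_cases h50 : s ≥ 50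
              · simp [h4000, h2000, h1000, h500, h250, h100, h50,
                  PySem.List.slice, pvBADGES, List.append_assoc]
              · simp [h4000, h2000, h1000, h500, h250, h100, h50,
                  PySem.List.slice, pvBADGES]

theorem compute_badges_spec : Claim_equal_compute_badges := by
  intro score cl t _
  unfold Spec_compute_badges compute_badges compute_badges_alt
  simp only [pvCount_eq, zero_add]
  rw [pvChain]
  cases cl with
  | nil => simp
  | cons a l => simp
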